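-- pv_equiv track=rewrite | github.com/hyren01/KunShan-stdmatcher | utils/common_util.py | split_dict
-- ===== SOURCE A (Python) =====
-- def split_dict(in_dict, split_num):
--     """
--     将字典切分为N份
--     :param in_dict:
--     :param split_num:
--     :return:
--     """
--     assert isinstance(in_dict, dict)
--     assert split_num > 0
--     split_list = [[] for _ in range(split_num)]
--     for i, k in enumerate(in_dict):
--         idx = i % split_num
--         split_list[idx].append(k)
--     return [{k: in_dict[k] for k in l} for l in split_list]
-- ===== SOURCE B (Python) =====
-- def split_dict(in_dict, split_num):
--     """
--     将字典切分为N份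
--     :param in_dict:
--     :param split_num:
--     :return:
--     """
--     assert isinstance(in_dict, dict)
--     assert split_num > 0
--     items = list(in_dict.items())
--     return [dict(items[j::split_num]) for j in range(split_num)]
-- ===== Notes on version B (the rewrite author's own statement) =====
-- stated objective: idiomatic
-- what changed: Replaces the modulo-indexed scatter loop plus per-bucket dict-comprehension key lookups by materializing items once and taking the N strided slices items[j::split_num], each turned into a dict directly.
import Mathlib
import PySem

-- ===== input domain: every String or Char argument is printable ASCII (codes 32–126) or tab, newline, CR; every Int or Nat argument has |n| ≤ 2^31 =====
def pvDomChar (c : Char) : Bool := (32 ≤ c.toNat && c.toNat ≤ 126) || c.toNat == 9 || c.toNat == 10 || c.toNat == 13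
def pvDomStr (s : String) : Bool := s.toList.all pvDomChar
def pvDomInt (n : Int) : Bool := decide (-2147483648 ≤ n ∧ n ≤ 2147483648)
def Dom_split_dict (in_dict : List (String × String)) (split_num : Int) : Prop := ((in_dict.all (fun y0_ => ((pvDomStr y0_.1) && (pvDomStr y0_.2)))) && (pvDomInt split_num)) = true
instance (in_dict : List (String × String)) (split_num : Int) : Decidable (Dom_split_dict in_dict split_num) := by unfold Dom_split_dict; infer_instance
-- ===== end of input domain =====

-- B replaces A's modulo-indexed scatter loop (and its second key-lookup pass) by the N strided
-- slices items[j::split_num] of the materialized item list, each turned into a dict directly (idiomatic).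

-- ===== PORT A =====
-- A iterates the dict's keys with enumerate, scatters key i into bucket i % split_num, then
-- rebuilds each bucket as {k: in_dict[k] for k in l}.  Under Pre_ (split_num > 0) the index
-- i % split_num lies in [0, split_num), so .toNat is exact; in_dict[k] can never raise KeyError
-- (k is a key of the dict), so the `getD ""` default is never used.
def split_dict (in_dict : List (String × String)) (split_num : Int) : List (List (String × String)) :=
  let d := PySem.Dict.mk in_dict
  let split_list : List (List String) :=
    (PySem.List.enumerate d.keys 0).foldl
      (fun bs p => bs.modify (PySem.Int.mod p.1 split_num).toNat (fun b => b ++ [p.2]))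
      (List.replicate split_num.toNat [])
  split_list.map (fun l =>
    (l.foldl (fun acc k => acc.insert k ((d.get? k).getD "")) PySem.Dict.empty).items)

-- ===== PORT B =====
-- items[j::split_num] for each j in range(split_num); slice? is none only for step 0, and
-- split_num > 0 under Pre_, so the `getD []` default is never used.
def split_dict_alt (in_dict : List (String × String)) (split_num : Int) : List (List (String × String)) :=
  let items := (PySem.Dict.mk in_dict).items
  (PySem.List.pyRange 0 split_num 1).map (fun j =>
    (PySem.Dict.ofList ((PySem.List.slice? items (some j) none split_num).getD [])).items)

-- ===== PRECONDITION & SPEC =====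
-- Pre_ excludes split_num ≤ 0, on which Python A raises AssertionError; it also excludes
-- association lists with duplicate keys, which cannot occur as a Python dict (the parameter
-- models a dict): on such lists both Pythons receive the same collapsed dict and agree, the
-- exclusion only keeps the assoc-list model faithful.
def Pre_split_dict (in_dict : List (String × String)) (split_num : Int) : Prop :=
  0 < split_num ∧ (in_dict.map Prod.fst).Nodup
instance (in_dict : List (String × String)) (split_num : Int) : Decidable (Pre_split_dict in_dict split_num) := by unfold Pre_split_dict; infer_instance

def pvWitness_split_dict : (List (String × String)) × Int := ([("a", "1"), ("b", "2"), ("c", "3")], 2)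

def Spec_split_dict (in_dict : List (String × String)) (split_num : Int) (out : List (List (String × String))) : Prop := out = split_dict_alt in_dict split_num
instance (in_dict : List (String × String)) (split_num : Int) (out : List (List (String × String))) : Decidable (Spec_split_dict in_dict split_num out) := by unfold Spec_split_dict; infer_instance

-- ===== CLAIM (what is proved, stated in full; the proofs are below) =====
def Claim_equal_split_dict : Prop := ∀ (in_dict : List (String × String)) (split_num : Int), Dom_split_dict in_dict split_num → Pre_split_dict in_dict split_num → Spec_split_dict in_dict split_num (split_dict in_dict split_num)

-- ===== LEMMAS AND PROOFS =====

def pvStride {α : Type} (s : Nat) : List α → Nat → List α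
  | [], _ => []
  | x :: t, 0 => x :: pvStride s t (s - 1)
  | _ :: t, j + 1 => pvStride s t j

theorem pvStride_append_skip {α : Type} (s : Nat) (t : List α) : ∀ (v : List α) (j : Nat),
    t.length ≤ j → pvStride s (t ++ v) j = pvStride s v (j - t.length) := by
  induction t with
  | nil => intro v j _; simp
  | cons x t ih =>
    intro v j hj
    match j, hj with
    | j + 1, hj =>
      simp only [List.cons_append, pvStride]
      rw [ih v j (by simpa using hj)]
      simp [Nat.succ_sub_succ]

theorem pvStride_of_length_le {α : Type} (s : Nat) (xs : List α) (j : Nat)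
    (h : xs.length ≤ j) : pvStride s xs j = [] := by
  have := pvStride_append_skip s xs [] j h
  simpa using this

theorem pvStride_drop {α : Type} (s : Nat) (xs : List α) : ∀ (j : Nat),
    pvStride s xs j = pvStride s (xs.drop j) 0 := by
  induction xs with
  | nil => intro j; simp [pvStride]
  | cons x t ih =>
    intro j
    cases j with
    | zero => simp
    | succ j => simpa [pvStride] using ih j

theorem pvStride_map {α β : Type} (s : Nat) (f : α → β) (xs : List α) : ∀ (j : Nat),
    pvStride s (xs.map f) j = (pvStride s xs j).map f := by
  induction xs with
  | nil => intro j; simp [pvStride]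
  | cons x t ih =>
    intro j
    cases j with
    | zero => simp [pvStride, ih]
    | succ j => simp [pvStride, ih]

theorem pvStride_sublist {α : Type} (s : Nat) (xs : List α) : ∀ (j : Nat),
    (pvStride s xs j).Sublist xs := by
  induction xs with
  | nil => intro j; simp [pvStride]
  | cons x t ih =>
    intro j
    cases j with
    | zero =>
      show (x :: pvStride s t (s - 1)).Sublist (x :: t)
      exact List.cons_sublist_cons.mpr (ih (s - 1))
    | succ j => exact (ih j).trans (List.sublist_cons_self x t)

theorem pvStride_chunk {α : Type} (s : Nat) (u v : List α) (j : Nat) (hj : j < s)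
    (hu : u.length ≤ s) (hv : u.length < s → v = []) :
    pvStride s (u ++ v) j = (u[j]?).toList ++ pvStride s v j := by
  by_cases hjl : j < u.length
  · rw [pvStride_drop]
    have hdrop : (u ++ v).drop j = u[j] :: (u.drop (j + 1) ++ v) := by
      rw [List.drop_append, Nat.sub_eq_zero_of_le (Nat.le_of_lt hjl), List.drop_zero,
          List.drop_eq_getElem_cons hjl, List.cons_append]
    rw [hdrop]
    show u[j] :: pvStride s (u.drop (j + 1) ++ v) (s - 1) = _
    have hlen : (u.drop (j + 1)).length ≤ s - 1 := by simp; omega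
    rw [pvStride_append_skip s _ _ _ hlen]
    have hget : u[j]? = some u[j] := List.getElem?_eq_getElem hjl
    rw [hget]
    by_cases hus : u.length = s
    · have : s - 1 - (u.drop (j + 1)).length = j := by simp; omega
      rw [this]; rfl
    · have hv' : v = [] := hv (by omega)
      subst hv'
      simp [pvStride_of_length_le]
  · have hget : u[j]? = none := List.getElem?_eq_none (by omega)
    have hv' : v = [] := hv (by omega)
    subst hv'
    rw [hget]
    simp only [List.append_nil, Option.toList_none, List.nil_append]
    rw [pvStride_of_length_le s u j (by omega), pvStride_of_length_le s [] j (by simp)]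

theorem pvStride_eq_filterMap {α : Type} (s : Nat) (hs : 0 < s) : ∀ (xs : List α) (j : Nat),
    pvStride s xs j = (List.range xs.length).filterMap (fun k => xs[j + s * k]?) := by
  intro xs
  induction xs with
  | nil => intro j; simp [pvStride]
  | cons x t ih =>
    intro j
    cases j with
    | zero =>
      show x :: pvStride s t (s - 1) = _
      rw [List.length_cons, List.range_succ_eq_map, List.filterMap_cons, List.filterMap_map]
      simp only [Nat.zero_add, Nat.mul_zero, List.getElem?_cons_zero]
      congr 1
      rw [ih (s - 1)]
      apply List.filterMap_congr
      intro k _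
      have h1 : s * Nat.succ k = (s - 1 + s * k) + 1 := by
        rw [Nat.mul_succ]; omega
      simp only [Function.comp, h1, List.getElem?_cons_succ]
    | succ j =>
      show pvStride s t j = _
      rw [List.length_cons, List.range_succ, List.filterMap_append]
      have h2 : ∀ k : Nat, j + 1 + s * k = (j + s * k) + 1 := by intro k; omega
      have h3 : t[j + s * t.length]? = none := by
        apply List.getElem?_eq_none
        have := Nat.le_mul_of_pos_left t.length hs
        omega
      simp only [h2, List.getElem?_cons_succ, List.filterMap_cons, List.filterMap_nil, h3,
        List.append_nil]
      exact ih j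

theorem pv_filterMap_range_stab {α : Type} (xs : List α) (j s C : Nat)
    (hC : xs.length ≤ j + s * C) (hCl : C ≤ xs.length) :
    (List.range C).filterMap (fun k => xs[j + s * k]?)
      = (List.range xs.length).filterMap (fun k => xs[j + s * k]?) := by
  have hsplit : xs.length = C + (xs.length - C) := by omega
  rw [hsplit, List.range_add, List.filterMap_append]
  have hnil : List.filterMap (fun k => xs[j + s * k]?) (List.map (fun x => C + x) (List.range (xs.length - C))) = [] := by
    rw [List.filterMap_map, List.filterMap_eq_nil_iff]
    intro a _
    apply List.getElem?_eq_none
    have : s * C ≤ s * (C + a) := Nat.mul_le_mul_left s (by omega)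
    show xs.length ≤ j + s * (C + a)
    omega
  rw [hnil, List.append_nil]

theorem pv_slice?_stride {α : Type} (xs : List α) (j s : Nat) (hs : 0 < s) :
    PySem.List.slice? xs (some (j : Int)) none (s : Int) = some (pvStride s xs j) := by
  have hsne : (s : Int) ≠ 0 := by exact_mod_cast hs.ne'
  have hsnlt : ¬ ((s : Int) < 0) := by omega
  simp only [PySem.List.slice?, PySem.List.sliceIndices, hsne, if_neg hsnlt, if_false]
  have hj0 : ¬ ((j : Int) < 0) := by omega
  have hs0 : (0 : Int) < (s : Int) := by exact_mod_cast hs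
  simp only [if_neg hj0, if_pos hs0]
  by_cases hjl : j < xs.length
  · have hmin : min ((j : Int)) ((xs.length : Int)) = (j : Int) :=
      min_eq_left (by exact_mod_cast hjl.le)
    have hlt : ((j : Int)) < (xs.length : Int) := by exact_mod_cast hjl
    rw [hmin, if_pos hlt]
    have hcast : ((xs.length : Int) - (j : Int) + (s : Int) - 1)
        = ((xs.length - j + s - 1 : Nat) : Int) := by omega
    have hcnt : (((xs.length : Int) - (j : Int) + (s : Int) - 1) / (s : Int)).toNat
        = (xs.length - j + s - 1) / s := by
      rw [hcast, ← Int.natCast_ediv]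
      exact Int.toNat_natCast _
    rw [hcnt]
    have hfun : List.filterMap (fun (x : Nat) => xs[((j : Int) + (s : Int) * (x : Int)).toNat]?)
          (List.range ((xs.length - j + s - 1) / s))
        = List.filterMap (fun (x : Nat) => xs[j + s * x]?)
          (List.range ((xs.length - j + s - 1) / s)) := by
      apply List.filterMap_congr
      intro x _
      have hx : ((j : Int) + (s : Int) * (x : Int)) = ((j + s * x : Nat) : Int) := by
        push_cast; ring
      rw [hx, Int.toNat_natCast]
    rw [hfun]
    congr 1
    set L := xs.length - j with hL
    set q := (L + s - 1) / s with hq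
    have hdm := Nat.div_add_mod (L + s - 1) s
    have hr : (L + s - 1) % s < s := Nat.mod_lt _ hs
    rw [← hq] at hdm
    have hLq : L ≤ s * q := by
      set M := s * q
      omega
    have hqL : q ≤ xs.length := by
      obtain ⟨L', hL' ⟩ : ∃ L', L = L' + 1 := ⟨L - 1, by omega⟩
      have h1 : L' ≤ s * L' := Nat.le_mul_of_pos_left L' hs
      have h2 : s * (L' + 1) = s * L' + s := by ring
      have h3 : q ≤ L' + 1 := by
        apply Nat.le_of_mul_le_mul_left (c := s) ?_ hs
        set M1 := s * q
        set M2 := s * L'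
        omega
      omega
    rw [pv_filterMap_range_stab xs j s q (by set M := s * q; omega) hqL]
    exact (pvStride_eq_filterMap s hs xs j).symm
  · have hmin : min ((j : Int)) ((xs.length : Int)) = (xs.length : Int) :=
      min_eq_right (by exact_mod_cast Nat.le_of_not_lt hjl)
    rw [hmin]
    simp only [lt_irrefl, if_false, List.range_zero, List.filterMap_nil]
    rw [pvStride_of_length_le s xs j (Nat.le_of_not_lt hjl)]

theorem pv_foldl_modify_getElem? {α : Type} (idx : Int × α → Nat) :
    ∀ (l : List (Int × α)) (bs : List (List α)) (j : Nat),
    (l.foldl (fun bs p => bs.modify (idx p) (fun b => b ++ [p.2])) bs)[j]?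
      = (bs[j]?).map (fun b => b ++ (l.filter (fun p => idx p == j)).map (·.2)) := by
  intro l
  induction l with
  | nil => intro bs j; simp
  | cons p l ih =>
    intro bs j
    rw [List.foldl_cons, ih, List.getElem?_modify]
    by_cases h : idx p = j
    · simp only [List.filter_cons, h, beq_self_eq_true, if_pos]
      cases hb : bs[j]? <;> simp [List.append_assoc]
    · have hb : (idx p == j) = false := by simp [h]
      simp only [List.filter_cons, hb, if_neg h, Bool.false_eq_true, if_false]
      cases hbj : bs[j]? <;> simp

theorem pv_abkt_shift {α : Type} (n j : Nat) (v : List α) : ∀ (c : Nat),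
    ((PySem.List.enumerate v ((c : Int) + (n : Int))).filter
        (fun p => (PySem.Int.mod p.1 (n : Int)).toNat == j)).map (·.2)
      = ((PySem.List.enumerate v (c : Int)).filter
        (fun p => (PySem.Int.mod p.1 (n : Int)).toNat == j)).map (·.2) := by
  induction v with
  | nil => intro c; simp [PySem.List.enumerate]
  | cons x t ih =>
    intro c
    rw [PySem.List.enumerate_cons, PySem.List.enumerate_cons]
    have hmod : PySem.Int.mod ((c : Int) + (n : Int)) (n : Int)
        = PySem.Int.mod (c : Int) (n : Int) := by
      have h1 : ((c : Int) + (n : Int)) = (((c + n : Nat)) : Int) := by push_cast; ring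
      rw [h1, PySem.Int.mod_natCast, PySem.Int.mod_natCast, Nat.add_mod_right]
    have hstep : ((c : Int) + (n : Int) + 1) = (((c + 1 : Nat)) : Int) + (n : Int) := by
      push_cast; ring
    rw [List.filter_cons, List.filter_cons, hmod, hstep]
    have := ih (c + 1)
    by_cases h : (PySem.Int.mod (c : Int) (n : Int)).toNat = j
    · simp only [h, beq_self_eq_true, if_true, List.map_cons]
      rw [this]
      push_cast
      rfl
    · have hb : ((PySem.Int.mod (c : Int) (n : Int)).toNat == j) = false :=
        beq_eq_false_iff_ne.mpr h
      simp only [hb, Bool.false_eq_true, if_false]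
      rw [this]
      push_cast
      rfl

theorem pv_abkt_inbounds {α : Type} (n j : Nat) (u : List α) : ∀ (c : Nat),
    c + u.length ≤ n →
    ((PySem.List.enumerate u (c : Int)).filter
        (fun p => (PySem.Int.mod p.1 (n : Int)).toNat == j)).map (·.2)
      = (if c ≤ j then u[j - c]? else none).toList := by
  induction u with
  | nil =>
    intro c _
    simp only [PySem.List.enumerate, List.filter_nil, List.map_nil]
    cases h : (if c ≤ j then (([] : List α))[j - c]? else none) <;> simp_all
  | cons x t ih =>
    intro c hc
    rw [PySem.List.enumerate_cons, List.filter_cons]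
    have hcn : c < n := by simp at hc; omega
    have hmod : (PySem.Int.mod (c : Int) (n : Int)).toNat = c := by
      rw [PySem.Int.mod_natCast, Nat.mod_eq_of_lt hcn, Int.toNat_natCast]
    rw [hmod]
    have hrec := ih (c + 1) (by simp at hc ⊢; omega)
    have hcast : ((c : Int) + 1) = (((c + 1 : Nat)) : Int) := by push_cast; ring
    by_cases h : c = j
    · subst h
      simp only [beq_self_eq_true, if_true, List.map_cons]
      rw [hcast, hrec]
      have : ¬ (c + 1 ≤ c) := by omega
      simp [this]
    · have hb : (c == j) = false := by simp [h]
      simp only [hb, Bool.false_eq_true, if_false]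
      rw [hcast, hrec]
      by_cases hcj : c ≤ j
      · have h1 : c + 1 ≤ j := by omega
        have h2 : j - c = (j - (c + 1)) + 1 := by omega
        simp [h1, hcj, h2]
      · have h1 : ¬ (c + 1 ≤ j) := by omega
        simp [h1, hcj]

theorem pv_abkt_eq_stride {α : Type} (n : Nat) (hn : 0 < n) (j : Nat) (hj : j < n) :
    ∀ (xs : List α),
    ((PySem.List.enumerate xs 0).filter
        (fun p => (PySem.Int.mod p.1 (n : Int)).toNat == j)).map (·.2)
      = pvStride n xs j := by
  intro xs
  induction hL : xs.length using Nat.strong_induction_on generalizing xs with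
  | _ L IH =>
  rcases xs with _ | ⟨x, t⟩
  · simp [PySem.List.enumerate, pvStride]
  · set xs := x :: t with hxs
    have hpos : 0 < xs.length := by simp [hxs]
    have hsplit : xs = xs.take n ++ xs.drop n := (List.take_append_drop n xs).symm
    have hul : (xs.take n).length ≤ n := by simp
    conv_lhs => rw [hsplit]
    rw [PySem.List.enumerate_append]
    have h0 : ((0 : Int) + ((xs.take n).length : Int)) = ((xs.take n).length : Int) := by ring
    rw [h0, List.filter_append, List.map_append]
    have hfirst := pv_abkt_inbounds (α := α) n j (xs.take n) 0 (by omega)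
    simp only [Nat.sub_zero, Nat.zero_le, if_true] at hfirst
    have hfirst' : ((PySem.List.enumerate (xs.take n) ((0 : Nat) : Int)).filter
        (fun p => (PySem.Int.mod p.1 (n : Int)).toNat == j)).map (·.2)
        = ((xs.take n)[j]?).toList := by
      simpa using hfirst
    by_cases hlen : xs.length ≤ n
    · have hdrop : xs.drop n = [] := List.drop_eq_nil_of_le hlen
      have htake : xs.take n = xs := List.take_of_length_le hlen
      rw [hdrop] at hsplit ⊢
      simp only [PySem.List.enumerate, List.filter_nil, List.map_nil, List.append_nil]
      rw [show ((0 : Int)) = (((0 : Nat)) : Int) from rfl, hfirst']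
      have := pvStride_chunk n (xs.take n) [] j hj hul (fun _ => rfl)
      rw [List.append_nil, htake] at this
      rw [this, htake]
      simp [pvStride]
    · have hul' : (xs.take n).length = n := by simp; omega
      have hcast : (((xs.take n).length : Int)) = (((0 : Nat)) : Int) + ((n : Nat) : Int) := by
        rw [hul']; push_cast; ring
      rw [hcast, pv_abkt_shift n j (xs.drop n) 0,
        show (((0 : Nat)) : Int) = (0 : Int) from by norm_num]
      have hlt : (xs.drop n).length < L := by
        rw [← hL]; simp [hxs]; omega
      rw [IH (xs.drop n).length hlt (xs.drop n) rfl]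
      rw [show ((0 : Int)) = (((0 : Nat)) : Int) from rfl, hfirst']
      conv_rhs => rw [hsplit]
      rw [pvStride_chunk n (xs.take n) (xs.drop n) j hj hul (fun h => absurd hul' (by omega))]

theorem pv_update_items_nodup {κ ν : Type} [BEq κ] [LawfulBEq κ] (ps : List (κ × ν)) :
    ∀ (d : PySem.Dict κ ν), ((d.items ++ ps).map Prod.fst).Nodup →
    (d.update ps).items = d.items ++ ps := by
  induction ps with
  | nil => intro d _; simp [PySem.Dict.update]
  | cons p ps ih =>
    intro d hnd
    have hnotin : p.1 ∉ d.items.map Prod.fst := by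
      have h2 := List.disjoint_of_nodup_append (by simpa [List.map_append] using hnd)
      intro hmem
      exact h2 hmem (by simp)
    have hcont : d.contains p.1 = false := by
      rw [PySem.Dict.contains, List.any_eq_false]
      intro q hq
      simp only [Bool.not_eq_true]
      refine beq_eq_false_iff_ne.mpr ?_
      intro he
      exact hnotin (he ▸ List.mem_map_of_mem hq)
    show ((d.insert p.1 p.2).update ps).items = _
    rw [PySem.Dict.insert, hcont]
    simp only [Bool.false_eq_true, if_false]
    have hd' : (PySem.Dict.mk (d.items ++ [p])).items = d.items ++ [p] := rfl
    rw [ih (PySem.Dict.mk (d.items ++ [p])) (by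
      rw [hd', List.append_assoc]
      simpa using hnd)]
    simp

theorem pv_ofList_items_nodup {κ ν : Type} [BEq κ] [LawfulBEq κ] (ps : List (κ × ν))
    (h : (ps.map Prod.fst).Nodup) : (PySem.Dict.ofList ps).items = ps := by
  show (PySem.Dict.empty.update ps).items = ps
  rw [pv_update_items_nodup ps PySem.Dict.empty (by simpa [PySem.Dict.empty] using h)]
  simp [PySem.Dict.empty]

theorem pv_get?_of_nodup {κ ν : Type} [BEq κ] [LawfulBEq κ] : ∀ (l : List (κ × ν)),
    (l.map Prod.fst).Nodup → ∀ {k : κ} {v : ν}, (k, v) ∈ l →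
    (PySem.Dict.mk l).get? k = some v := by
  intro l
  induction l with
  | nil => intro _ k v hm; cases hm
  | cons q l ih =>
    intro hnd k v hm
    have hnd' := hnd
    rw [List.map_cons, List.nodup_cons] at hnd'
    obtain ⟨hq, hl⟩ := hnd'
    simp only [PySem.Dict.get?, List.find?_cons]
    rcases List.mem_cons.mp hm with he | ht
    · cases he.symm
      simp
    · have hqk : (q.1 == k) = false := by
        refine beq_eq_false_iff_ne.mpr ?_
        intro he
        apply hq
        rw [he]
        exact List.mem_map_of_mem ht
      rw [hqk]
      exact ih hl ht

theorem split_dict_eq_alt (in_dict : List (String × String)) (split_num : Int)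
    (hpos : 0 < split_num) (hnd : (in_dict.map Prod.fst).Nodup) :
    split_dict in_dict split_num = split_dict_alt in_dict split_num := by
  have hsn : split_num = ((split_num.toNat : Nat) : Int) := (Int.toNat_of_nonneg hpos.le).symm
  set n := split_num.toNat with hn
  have hn0 : 0 < n := by omega
  rw [hsn]
  simp only [split_dict, split_dict_alt]
  have hB : (PySem.List.pyRange 0 ((n : Nat) : Int) 1).map (fun j =>
        (PySem.Dict.ofList ((PySem.List.slice? in_dict (some j) none ((n : Nat) : Int)).getD [])).items)
      = (List.range n).map (fun k => pvStride n in_dict k) := by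
    rw [PySem.List.pyRange_zero_nat n, List.map_map]
    apply List.map_congr_left
    intro k hk
    simp only [Function.comp]
    rw [pv_slice?_stride in_dict k n hn0]
    simp only [Option.getD_some]
    exact pv_ofList_items_nodup _
      (((pvStride_sublist n in_dict k).map Prod.fst).nodup hnd)
  rw [hB]
  apply List.ext_getElem?
  intro i
  rw [List.getElem?_map, List.getElem?_map,
    pv_foldl_modify_getElem? (fun p => (PySem.Int.mod p.1 ((n : Nat) : Int)).toNat)]
  rw [Int.toNat_natCast, List.getElem?_replicate]
  by_cases hi : i < n
  · simp only [if_pos hi, Option.map_some, List.nil_append, List.getElem?_range hi]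
    have hk : (PySem.Dict.mk in_dict).keys = in_dict.map Prod.fst := rfl
    rw [hk, pv_abkt_eq_stride n hn0 i hi, pvStride_map, List.foldl_map]
    have hfold : (pvStride n in_dict i).foldl
          (fun acc q => acc.insert q.1 (((PySem.Dict.mk in_dict).get? q.1).getD ""))
          PySem.Dict.empty
        = (pvStride n in_dict i).foldl (fun acc q => acc.insert q.1 q.2) PySem.Dict.empty := by
      apply PySem.List.foldl_congr_mem
      intro acc q hq
      have hmem : (q.1, q.2) ∈ in_dict := by
        have := (pvStride_sublist n in_dict i).subset hq
        simpa using this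
      rw [pv_get?_of_nodup in_dict hnd hmem]
      rfl
    rw [hfold]
    have hofl : (pvStride n in_dict i).foldl (fun acc q => acc.insert q.1 q.2) PySem.Dict.empty
        = PySem.Dict.ofList (pvStride n in_dict i) := rfl
    rw [hofl, pv_ofList_items_nodup _ (((pvStride_sublist n in_dict i).map Prod.fst).nodup hnd)]
  · rw [List.getElem?_eq_none (show (List.range n).length ≤ i by simpa using Nat.le_of_not_lt hi)]
    simp [if_neg hi]

-- ===== VERDICT (by name: the statement is the Claim_ definition above) =====
theorem split_dict_spec : Claim_equal_split_dict := by
  intro in_dict split_num _ hpre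
  exact split_dict_eq_alt in_dict split_num hpre.1 hpre.2
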